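-- pv_equiv track=rewrite | github.com/tszreder/python_day2 | Day3/methods-tasks.py | generateHTMLwithBackground
-- ===== SOURCE A (Python) =====
-- def generateHTMLwithBackground(posts, color_name = "black", fontSize = 12):
--     html_content = ""
--     backgroundColor = "black"
--     for post in posts:
--         html_content += '<span style="color: %s; font-size: %s; background-color: %s “>%s</span>\n' % \
--                         (color_name, fontSize, backgroundColor, post)
--         if backgroundColor == "black":
--             backgroundColor = "white"
--         else:
--             backgroundColor = "black"
--     return html_content
-- ===== SOURCE B (Python) =====
-- def generateHTMLwithBackground(posts, color_name = "black", fontSize = 12):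
--     # Pre-render the two constant span openings once; the loop then consumes
--     # posts two at a time (one black span, one white span per step).
--     open_black = '<span style="color: %s; font-size: %s; background-color: black \u201c>' % (color_name, fontSize)
--     open_white = '<span style="color: %s; font-size: %s; background-color: white \u201c>' % (color_name, fontSize)
--     close = '</span>\n'
--     parts = []
--     append = parts.append
--     i = 0
--     n = len(posts)
--     while i + 1 < n:
--         append(open_black + posts[i] + close)
--         append(open_white + posts[i + 1] + close)
--         i += 2
--     if i < n:
--         append(open_black + posts[i] + close)
--     return "".join(parts)
-- ===== Notes on version B (the rewrite author's own statement) =====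
-- stated objective: alternative
-- what changed: B pre-renders the two constant span openings once, then consumes posts two at a time with an index-stepping pair loop (black span, white span per step, trailing black span for an odd leftover) appending to a list joined once, so the per-element %-formatting, the toggling color state and the string accumulation of A all disappear.
import Mathlib
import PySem

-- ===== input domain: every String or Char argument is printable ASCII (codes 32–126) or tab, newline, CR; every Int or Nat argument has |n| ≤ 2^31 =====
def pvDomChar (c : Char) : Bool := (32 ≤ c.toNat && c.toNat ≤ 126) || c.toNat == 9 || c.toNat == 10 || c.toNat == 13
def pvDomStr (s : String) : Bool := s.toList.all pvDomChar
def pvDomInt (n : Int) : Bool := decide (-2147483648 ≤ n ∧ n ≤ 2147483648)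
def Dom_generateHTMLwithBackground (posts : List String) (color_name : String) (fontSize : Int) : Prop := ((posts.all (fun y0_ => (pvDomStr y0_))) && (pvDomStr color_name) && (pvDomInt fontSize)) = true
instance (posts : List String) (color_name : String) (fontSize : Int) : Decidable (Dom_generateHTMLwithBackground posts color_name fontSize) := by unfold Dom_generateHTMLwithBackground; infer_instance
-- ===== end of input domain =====

-- B replaces A's toggling state variable and string accumulation with a pair-consuming loop
-- emitting one black and one white span per step (objective: alternative, same cost).

-- shared formatting of the (identical) Python format-string literal of A and B
def pvSpan (color_name : String) (fontSize : Int) (bg post : String) : String :=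
  "<span style=\"color: " ++ color_name ++ "; font-size: " ++ PySem.Int.toStr fontSize ++ "; background-color: " ++ bg ++ " “>" ++ post ++ "</span>\n"

-- ===== PORT A =====
def generateHTMLwithBackground (posts : List String) (color_name : String) (fontSize : Int) : String :=
  (posts.foldl
    (fun (st : String × String) post =>
      (st.1 ++ pvSpan color_name fontSize st.2 post,
       if st.2 = "black" then "white" else "black"))
    ("", "black")).1

-- ===== PORT B =====
-- Source B precomputes the two constant span openings once …
def pvOpen (color_name : String) (fontSize : Int) (bg : String) : String :=
  "<span style=\"color: " ++ color_name ++ "; font-size: " ++ PySem.Int.toStr fontSize ++ "; background-color: " ++ bg ++ " “>"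

-- … and its index-stepping pair loop is the obvious structural two-at-a-time recursion
def pvPairs (openBlack openWhite close : String) : List String → List String
  | [] => []
  | [p] => [openBlack ++ p ++ close]
  | p :: q :: rest =>
      (openBlack ++ p ++ close) :: (openWhite ++ q ++ close) :: pvPairs openBlack openWhite close rest

def generateHTMLwithBackground_alt (posts : List String) (color_name : String) (fontSize : Int) : String :=
  String.join (pvPairs (pvOpen color_name fontSize "black") (pvOpen color_name fontSize "white") "</span>\n" posts)

-- ===== PRECONDITION & SPEC =====
def Spec_generateHTMLwithBackground (posts : List String) (color_name : String) (fontSize : Int) (out : String) : Prop := out = generateHTMLwithBackground_alt posts color_name fontSize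
instance (posts : List String) (color_name : String) (fontSize : Int) (out : String) : Decidable (Spec_generateHTMLwithBackground posts color_name fontSize out) := by unfold Spec_generateHTMLwithBackground; infer_instance

-- ===== CLAIM (what is proved, stated in full; the proofs are below) =====
def Claim_equal_generateHTMLwithBackground : Prop := ∀ (posts : List String) (color_name : String) (fontSize : Int), Dom_generateHTMLwithBackground posts color_name fontSize → Spec_generateHTMLwithBackground posts color_name fontSize (generateHTMLwithBackground posts color_name fontSize)

-- ===== LEMMAS AND PROOFS =====
lemma pv_join_cons (s : String) (l : List String) :
    String.join (s :: l) = s ++ String.join l := by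
  have hfold : ∀ (l : List String) (a : String),
      l.foldl (fun r t => r ++ t) a = a ++ l.foldl (fun r t => r ++ t) "" := by
    intro l
    induction l with
    | nil => simp
    | cons q qs ih2 =>
      intro a
      simp only [List.foldl_cons]
      rw [ih2 (a ++ q), ih2 ("" ++ q), String.append_assoc]
      simp
  simp only [String.join, List.foldl_cons]
  rw [hfold l ("" ++ s)]
  simp

lemma pvSpan_split (c : String) (f : Int) (bg post : String) :
    pvSpan c f bg post = pvOpen c f bg ++ post ++ "</span>\n" := by
  simp [pvSpan, pvOpen, String.append_assoc]

lemma pv_fold_pairs (color_name : String) (fontSize : Int) :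
    (l : List String) → ∀ (acc : String),
    (l.foldl
      (fun (st : String × String) post =>
        (st.1 ++ pvSpan color_name fontSize st.2 post,
         if st.2 = "black" then "white" else "black"))
      (acc, "black")).1
    = acc ++ String.join (pvPairs (pvOpen color_name fontSize "black") (pvOpen color_name fontSize "white") "</span>\n" l)
  | [] => by intro acc; simp [pvPairs, String.join]
  | [p] => by
      intro acc
      simp [pvPairs, String.join, pvSpan_split]
  | p :: q :: rest => by
      intro acc
      have ih := pv_fold_pairs color_name fontSize rest
      simp only [List.foldl_cons, pvPairs, pv_join_cons]
      norm_num
      rw [show (if ("white":String) = "black" then "white" else ("black":String)) = "black" from by decide, ih]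
      simp [String.append_assoc, pvSpan_split]

-- ===== VERDICT (by name: the statement is the Claim_ definition above) =====
theorem generateHTMLwithBackground_spec : Claim_equal_generateHTMLwithBackground := by
  intro posts color_name fontSize _
  unfold Spec_generateHTMLwithBackground generateHTMLwithBackground generateHTMLwithBackground_alt
  simpa using pv_fold_pairs color_name fontSize posts ""
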